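-- pv_equiv track=rewrite | github.com/fangwei123456/spikingjelly | spikingjelly/activation_based/distributed/dtensor.py | recommended_pipeline_microbatches
-- ===== SOURCE A (Python) =====
-- def recommended_pipeline_microbatches(batch_size: int, num_stages: int) -> int:
--     if batch_size <= 0:
--         raise ValueError(f"batch_size must be positive, but got {batch_size}.")
--     if num_stages <= 0:
--         raise ValueError(f"num_stages must be positive, but got {num_stages}.")
--     if batch_size < num_stages:
--         raise ValueError(
--             f"batch_size ({batch_size}) must be >= num_stages ({num_stages}) for pipeline "
--             "parallelism with the current microbatch splitting implementation."
--         )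
--
--     target = min(batch_size, num_stages * 4)
--     for candidate in range(target, num_stages - 1, -1):
--         if batch_size % candidate == 0:
--             return candidate
--     return num_stages
-- ===== SOURCE B (Python) =====
-- def recommended_pipeline_microbatches(batch_size: int, num_stages: int) -> int:
--     if batch_size <= 0:
--         raise ValueError(f"batch_size must be positive, but got {batch_size}.")
--     if num_stages <= 0:
--         raise ValueError(f"num_stages must be positive, but got {num_stages}.")
--     if batch_size < num_stages:
--         raise ValueError(
--             f"batch_size ({batch_size}) must be >= num_stages ({num_stages}) for pipeline "
--             "parallelism with the current microbatch splitting implementation."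
--         )
--
--     target = min(batch_size, num_stages * 4)
--     best = num_stages
--     i = 1
--     while i * i <= batch_size:
--         if batch_size % i == 0:
--             for d in (i, batch_size // i):
--                 if num_stages <= d <= target and best < d:
--                     best = d
--         i += 1
--     return best
-- ===== Notes on version B (the rewrite author's own statement) =====
-- stated objective: alternative
-- what changed: Instead of counting down from target testing every candidate for divisibility, B scans i = 1..sqrt(batch_size) once, uses the factor pairs (i, batch_size//i) to enumerate only the actual divisors, and keeps the largest one inside [num_stages, target], defaulting to num_stages; cost is O(sqrt(batch_size)) instead of O(num_stages), a win only when num_stages is large.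
import Mathlib
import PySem

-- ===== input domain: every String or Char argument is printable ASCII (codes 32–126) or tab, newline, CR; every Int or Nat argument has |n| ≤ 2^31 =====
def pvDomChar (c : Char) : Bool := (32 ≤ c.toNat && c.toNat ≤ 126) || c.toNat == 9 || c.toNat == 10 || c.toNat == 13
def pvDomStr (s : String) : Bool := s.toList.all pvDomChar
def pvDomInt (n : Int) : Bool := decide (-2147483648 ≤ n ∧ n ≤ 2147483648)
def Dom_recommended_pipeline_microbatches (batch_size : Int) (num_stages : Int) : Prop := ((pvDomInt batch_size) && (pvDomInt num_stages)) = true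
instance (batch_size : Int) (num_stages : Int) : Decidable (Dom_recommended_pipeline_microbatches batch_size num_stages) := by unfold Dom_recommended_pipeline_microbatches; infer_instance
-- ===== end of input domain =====

-- B replaces A's countdown divisibility scan by a single sqrt(batch_size) factor-pair pass (alternative algorithm); on the guard
-- inputs (batch_size <= 0, num_stages <= 0, batch_size < num_stages) both Pythons raise ValueError — excluded by Pre_.


-- ===== PORT A =====
-- 'for candidate in range(target, num_stages - 1, -1): if batch_size % candidate == 0: return candidate'
-- transliterated as a countdown recursion (range stops after num_stages); falls through to num_stages.
def pvALoop (batch_size num_stages candidate : Int) : Int :=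
  if _h : num_stages ≤ candidate then
    if PySem.Int.mod batch_size candidate = 0 then candidate
    else pvALoop batch_size num_stages (candidate - 1)
  else num_stages
termination_by (candidate + 1 - num_stages).toNat
decreasing_by omega

def recommended_pipeline_microbatches (batch_size : Int) (num_stages : Int) : Int :=
  -- the three 'raise ValueError' guards: excluded by Pre_, port returns 0 there
  if batch_size ≤ 0 then 0
  else if num_stages ≤ 0 then 0
  else if batch_size < num_stages then 0
  else pvALoop batch_size num_stages (min batch_size (num_stages * 4))

-- ===== PORT B =====
-- 'while i * i <= batch_size: if batch_size % i == 0: for d in (i, batch_size // i): …; i += 1'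
def pvBLoop (batch_size num_stages target i best : Int) : Int :=
  if _h : i * i ≤ batch_size then
    let best' :=
      if PySem.Int.mod batch_size i = 0 then
        let b1 := if num_stages ≤ i ∧ i ≤ target ∧ best < i then i else best
        let q := PySem.Int.floordiv batch_size i
        if num_stages ≤ q ∧ q ≤ target ∧ b1 < q then q else b1
      else best
    pvBLoop batch_size num_stages target (i + 1) best'
  else best
termination_by (batch_size + 1 - i).toNat
decreasing_by
  have h1 : 2 * i - 1 ≤ i * i := by nlinarith [sq_nonneg (i - 1)]
  have h2 : (0:Int) ≤ batch_size := le_trans (mul_self_nonneg i) _h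
  omega

def recommended_pipeline_microbatches_alt (batch_size : Int) (num_stages : Int) : Int :=
  if batch_size ≤ 0 then 0
  else if num_stages ≤ 0 then 0
  else if batch_size < num_stages then 0
  else pvBLoop batch_size num_stages (min batch_size (num_stages * 4)) 1 num_stages

-- ===== PRECONDITION & SPEC =====
-- Pre_ excludes exactly the inputs on which A raises ValueError (the three explicit guards).
def Pre_recommended_pipeline_microbatches (batch_size : Int) (num_stages : Int) : Prop :=
  0 < batch_size ∧ 0 < num_stages ∧ num_stages ≤ batch_size
instance (batch_size : Int) (num_stages : Int) : Decidable (Pre_recommended_pipeline_microbatches batch_size num_stages) := by unfold Pre_recommended_pipeline_microbatches; infer_instance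

def pvWitness_recommended_pipeline_microbatches : Int × Int := (12, 2)

def Spec_recommended_pipeline_microbatches (batch_size : Int) (num_stages : Int) (out : Int) : Prop := out = recommended_pipeline_microbatches_alt batch_size num_stages
instance (batch_size : Int) (num_stages : Int) (out : Int) : Decidable (Spec_recommended_pipeline_microbatches batch_size num_stages out) := by unfold Spec_recommended_pipeline_microbatches; infer_instance

-- ===== CLAIM (what is proved, stated in full; the proofs are below) =====
def Claim_equal_recommended_pipeline_microbatches : Prop := ∀ (batch_size : Int) (num_stages : Int), Dom_recommended_pipeline_microbatches batch_size num_stages → Pre_recommended_pipeline_microbatches batch_size num_stages → Spec_recommended_pipeline_microbatches batch_size num_stages (recommended_pipeline_microbatches batch_size num_stages)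

-- ===== LEMMAS AND PROOFS =====

-- 'Good b ns t r': r is the maximum divisor of b in [ns, t], or ns if there is none.
def pvGood (b ns t r : Int) : Prop :=
  ns ≤ r ∧ (r = ns ∨ (r ∣ b ∧ ns ≤ r ∧ r ≤ t)) ∧ (∀ d : Int, d ∣ b → ns ≤ d → d ≤ t → d ≤ r)

lemma pvGood_unique {b ns t r1 r2 : Int} (h1 : pvGood b ns t r1) (h2 : pvGood b ns t r2) : r1 = r2 := by
  obtain ⟨hns1, hd1, hmax1⟩ := h1
  obtain ⟨hns2, hd2, hmax2⟩ := h2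
  apply le_antisymm
  · rcases hd1 with h | ⟨hdvd, hlo, hhi⟩
    · omega
    · exact hmax2 r1 hdvd hlo hhi
  · rcases hd2 with h | ⟨hdvd, hlo, hhi⟩
    · omega
    · exact hmax1 r2 hdvd hlo hhi

lemma pvALoop_good (b ns : Int) :
    ∀ c : Int, pvGood b ns c (pvALoop b ns c) := by
  intro c
  induction c using pvALoop.induct b ns with
  | case1 c hle hmod =>
    rw [pvALoop]; simp only [hle, hmod, if_pos, dif_pos]
    refine ⟨hle, Or.inr ⟨(PySem.Int.mod_eq_zero_iff_dvd b c).mp hmod, hle, le_refl c⟩, ?_⟩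
    intro d _ _ hdc; exact hdc
  | case2 c hle hmod ih =>
    rw [pvALoop]; simp only [hle, hmod, dif_pos, if_false]
    obtain ⟨g1, g2, g3⟩ := ih
    refine ⟨g1, ?_, ?_⟩
    · rcases g2 with h | ⟨a1, a2, a3⟩
      · exact Or.inl h
      · exact Or.inr ⟨a1, a2, by omega⟩
    · intro d hdvd hlo hhi
      by_cases hdc : d = c
      · exact absurd ((PySem.Int.mod_eq_zero_iff_dvd b c).mpr (hdc ▸ hdvd)) hmod
      · exact g3 d hdvd hlo (by omega)
  | case3 c hle =>
    rw [pvALoop]; simp only [hle]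
    exact ⟨le_refl ns, Or.inl rfl, fun d _ hlo hhi => by omega⟩

lemma pvBLoop_good (b ns t : Int) (hns : 0 < ns) (htb : t ≤ b) :
    ∀ i best : Int, 1 ≤ i →
      ns ≤ best →
      (best = ns ∨ (best ∣ b ∧ ns ≤ best ∧ best ≤ t)) →
      (∀ d : Int, d ∣ b → ns ≤ d → d ≤ t →
        (∃ e : Int, 1 ≤ e ∧ e < i ∧ e ∣ b ∧ (d = e ∨ d = b / e)) → d ≤ best) →
      pvGood b ns t (pvBLoop b ns t i best) := by
  intro i best
  induction i, best using pvBLoop.induct b ns t with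
  | case1 i best hguard bestv ih =>
    intro hi1 hbns hbdvd hseen
    have hi0 : (0:Int) < i := hi1
    have hqe : PySem.Int.floordiv b i = b / i := PySem.Int.floordiv_eq_ediv_of_pos hi0
    have hbv : bestv = if PySem.Int.mod b i = 0 then
        (if ns ≤ PySem.Int.floordiv b i ∧ PySem.Int.floordiv b i ≤ t ∧
            (if ns ≤ i ∧ i ≤ t ∧ best < i then i else best) < PySem.Int.floordiv b i
          then PySem.Int.floordiv b i
          else (if ns ≤ i ∧ i ≤ t ∧ best < i then i else best))
        else best := rfl
    rw [hqe] at hbv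
    rw [pvBLoop, dif_pos hguard]
    by_cases hmod : PySem.Int.mod b i = 0
    · have hidvd : i ∣ b := (PySem.Int.mod_eq_zero_iff_dvd b i).mp hmod
      have hqdvd : b / i ∣ b := ⟨i, (Int.ediv_mul_cancel hidvd).symm⟩
      rw [if_pos hmod] at hbv
      set b1 := (if ns ≤ i ∧ i ≤ t ∧ best < i then i else best) with hb1
      have hb1ns : ns ≤ b1 := by
        rw [hb1]; split_ifs with h
        · exact h.1
        · exact hbns
      have hbvns : ns ≤ bestv := by
        rw [hbv]; split_ifs with h
        · exact h.1
        · exact hb1ns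
      have hb1dvd : b1 = ns ∨ (b1 ∣ b ∧ ns ≤ b1 ∧ b1 ≤ t) := by
        rw [hb1]; split_ifs with h
        · exact Or.inr ⟨hidvd, h.1, h.2.1⟩
        · exact hbdvd
      have hbvdvd : bestv = ns ∨ (bestv ∣ b ∧ ns ≤ bestv ∧ bestv ≤ t) := by
        rw [hbv]; split_ifs with h
        · exact Or.inr ⟨hqdvd, h.1, h.2.1⟩
        · exact hb1dvd
      have hmono : best ≤ bestv := by
        rw [hbv, hb1]; split_ifs <;> omega
      refine ih (by omega) hbvns hbvdvd ?_
      intro d hdvd hlo hhi ⟨e, he1, hei, hedvd, hde⟩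
      by_cases hei' : e < i
      · exact le_trans (hseen d hdvd hlo hhi ⟨e, he1, hei', hedvd, hde⟩) hmono
      · have hei2 : e = i := by omega
        rw [hei2] at hde
        have hdb1 : d ≤ b1 ∨ d = b / i := by
          rcases hde with hde | hde
          · left; rw [hb1, ← hde]; split_ifs with h1
            · exact le_refl d
            · by_contra hc
              exact h1 ⟨hlo, hhi, by omega⟩
          · right; exact hde
        rw [hbv]; split_ifs with h2
        · -- bestv = b / i
          rcases hdb1 with hdb1 | hde'
          · exact le_trans hdb1 (le_of_lt h2.2.2)
          · exact le_of_eq hde'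
        · -- bestv = b1
          rcases hdb1 with hdb1 | hde'
          · exact hdb1
          · have hnl : ¬ b1 < b / i := fun hc => h2 ⟨hde' ▸ hlo, hde' ▸ hhi, hc⟩
            rw [hde']
            exact not_lt.mp hnl
    · rw [if_neg hmod] at hbv
      refine ih (by omega) (by rw [hbv]; exact hbns) (by rw [hbv]; exact hbdvd) ?_
      intro d hdvd hlo hhi ⟨e, he1, hei, hedvd, hde⟩
      rw [hbv]
      by_cases hei' : e < i
      · exact hseen d hdvd hlo hhi ⟨e, he1, hei', hedvd, hde⟩
      · have hei2 : e = i := by omega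
        exact absurd ((PySem.Int.mod_eq_zero_iff_dvd b i).mpr (hei2 ▸ hedvd)) hmod
  | case2 i best hguard =>
    intro hi1 hbns hbdvd hseen
    rw [pvBLoop]; simp only [hguard]
    refine ⟨hbns, hbdvd, ?_⟩
    intro d hdvd hlo hhi
    -- every divisor d in [ns, t] has been seen: its small cofactor e = min(d, b/d) satisfies e*e ≤ b < i*i
    have hd1 : (1:Int) ≤ d := by omega
    have hdb : d ≤ b := le_trans hhi htb
    have hcof : b / d ∣ b := ⟨d, (Int.ediv_mul_cancel hdvd).symm⟩
    have hcof1 : (1:Int) ≤ b / d := by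
      rw [Int.le_ediv_iff_mul_le (by omega)]; omega
    have hmul : d * (b / d) = b := Int.mul_ediv_cancel' hdvd
    set e := min d (b / d) with he
    have he1 : (1:Int) ≤ e := le_min hd1 hcof1
    have heeb : e * e ≤ b := by
      calc e * e ≤ d * (b / d) := by
            apply mul_le_mul (min_le_left _ _) (min_le_right _ _) (by omega) (by omega)
        _ = b := hmul
    have hei : e < i := by nlinarith [lt_of_not_ge hguard]
    have hedvd : e ∣ b := by
      rw [he]; rcases le_total d (b / d) with h | h
      · rw [min_eq_left h]; exact hdvd
      · rw [min_eq_right h]; exact hcof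
    have hde : d = e ∨ d = b / e := by
      rw [he]; rcases le_total d (b / d) with h | h
      · exact Or.inl (min_eq_left h).symm
      · right
        rw [min_eq_right h]
        have hbd0 : b / d ≠ 0 := by omega
        conv_lhs => rw [← Int.mul_ediv_cancel_left (b := d) hbd0]
        rw [mul_comm d (b/d)] at hmul
        rw [hmul]
    exact hseen d hdvd hlo hhi ⟨e, he1, hei, hedvd, hde⟩

-- ===== VERDICT (by name: the statement is the Claim_ definition above) =====
theorem recommended_pipeline_microbatches_spec : Claim_equal_recommended_pipeline_microbatches := by
  intro b ns _hdom ⟨hb, hns, hle⟩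
  unfold Spec_recommended_pipeline_microbatches
  unfold recommended_pipeline_microbatches recommended_pipeline_microbatches_alt
  have h1 : ¬ b ≤ 0 := by omega
  have h2 : ¬ ns ≤ 0 := by omega
  have h3 : ¬ b < ns := by omega
  simp only [h1, h2, h3, if_false]
  set t := min b (ns * 4) with ht
  have hnt : ns ≤ t := le_min hle (by omega)
  have htb : t ≤ b := min_le_left _ _
  exact pvGood_unique (pvALoop_good b ns t)
    (pvBLoop_good b ns t hns htb 1 ns le_rfl le_rfl (Or.inl rfl)
      (fun d _ _ _ ⟨e, he1, hei, _, _⟩ => by omega))
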